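-- pv_equiv track=rewrite | github.com/nlpet/misc | codility/05_prefix_sums/genomic_range_query.py | minimal_impact_factors
-- ===== SOURCE A (Python) =====
-- impfs = {'A': 1, 'C': 2, 'G': 3, 'T': 4}
--
-- def minimal_impact_factors(S, P, Q, N):
--     L = [[0] * N, [0] * N, [0] * N]
--
--     for i in range(3):
--         L[i][-1] = N - 1 if impfs[S[N - 1]] <= i + 1 else N
--
--     for k in range(N - 2, -1, -1):
--         if impfs[S[k]] == 3:
--             L[0][k] = L[0][k + 1]
--             L[1][k] = L[1][k + 1]
--             L[2][k] = k
--         elif impfs[S[k]] == 2: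
--             L[0][k] = L[0][k + 1]
--             L[1][k] = k
--             L[2][k] = k
--         elif impfs[S[k]] == 1:
--             for i in range(3):
--                 L[i][k] = k
--         else:
--             for i in range(3):
--                 L[i][k] = L[i][k + 1]
--
--     return L
-- ===== SOURCE B (Python) =====
-- impfs = {'A': 1, 'C': 2, 'G': 3, 'T': 4}
--
-- def minimal_impact_factors(S, P, Q, N):
--     # Run-length construction: collect the qualifying positions per impact level,
--     # then build each row by filling constant blocks between consecutive positions.
--     L = []
--     for i in range(3):
--         pos = [k for k in range(N) if impfs[S[k]] <= i + 1]
--         row = []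
--         for p in pos:
--             row.extend([p] * (p + 1 - len(row)))
--         row.extend([N] * (N - len(row)))
--         L.append(row)
--     return L
-- ===== Notes on version B (the rewrite author's own statement) =====
-- stated objective: alternative
-- what changed: Replaces A's single interleaved backward next-occurrence scan with cascading equality branches by, per impact level, collecting the list of qualifying positions with a forward comprehension and then building the row as constant run-length blocks between consecutive qualifying positions (no per-index backward recurrence at all).
import Mathlib
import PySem

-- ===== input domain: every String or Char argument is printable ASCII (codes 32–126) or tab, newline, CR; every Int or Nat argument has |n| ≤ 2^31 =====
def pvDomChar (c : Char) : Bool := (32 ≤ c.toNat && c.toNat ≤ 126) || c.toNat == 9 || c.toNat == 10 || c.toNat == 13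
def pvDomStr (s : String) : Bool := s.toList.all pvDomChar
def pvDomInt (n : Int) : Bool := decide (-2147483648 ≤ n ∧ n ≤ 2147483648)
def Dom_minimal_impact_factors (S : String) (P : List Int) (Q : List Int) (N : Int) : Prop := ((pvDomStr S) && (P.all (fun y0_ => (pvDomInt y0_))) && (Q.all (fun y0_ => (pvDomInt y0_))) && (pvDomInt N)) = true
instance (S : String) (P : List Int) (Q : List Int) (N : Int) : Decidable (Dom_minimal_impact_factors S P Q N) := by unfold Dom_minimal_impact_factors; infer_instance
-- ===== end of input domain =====

-- B drops A's interleaved backward recurrence entirely: per impact level it collects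
-- the qualifying positions forward and builds the row as constant run-length blocks
-- between consecutive qualifying positions; objective: alternative (same cost).

-- ===== PORT A =====
-- impfs = {'A': 1, 'C': 2, 'G': 3, 'T': 4}
def impfs : PySem.Dict Char Int := PySem.Dict.mk [('A', 1), ('C', 2), ('G', 3), ('T', 4)]

-- impfs[S[k]]; inside Pre_ the index is valid and the char is a key, so the
-- defaults 'X'/4 are never used (outside Pre_ Python raises and nothing is claimed).
def pyval (S : String) (k : Int) : Int := impfs.getD ((PySem.Str.pyGet? S k).getD 'X') 4

-- body of A's second loop: the if/elif cascade updating the three rows in place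
def mifStepA (S : String) (t : List Int × List Int × List Int) (k : Int) :
    List Int × List Int × List Int :=
  if pyval S k = 3 then
    (PySem.List.pySetD t.1 k (PySem.List.pyGetD t.1 (k + 1) 0),
     PySem.List.pySetD t.2.1 k (PySem.List.pyGetD t.2.1 (k + 1) 0),
     PySem.List.pySetD t.2.2 k k)
  else if pyval S k = 2 then
    (PySem.List.pySetD t.1 k (PySem.List.pyGetD t.1 (k + 1) 0),
     PySem.List.pySetD t.2.1 k k,
     PySem.List.pySetD t.2.2 k k)
  else if pyval S k = 1 then
    (PySem.List.pySetD t.1 k k,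
     PySem.List.pySetD t.2.1 k k,
     PySem.List.pySetD t.2.2 k k)
  else
    (PySem.List.pySetD t.1 k (PySem.List.pyGetD t.1 (k + 1) 0),
     PySem.List.pySetD t.2.1 k (PySem.List.pyGetD t.2.1 (k + 1) 0),
     PySem.List.pySetD t.2.2 k (PySem.List.pyGetD t.2.2 (k + 1) 0))

def minimal_impact_factors (S : String) (P : List Int) (Q : List Int) (N : Int) : List (List Int) :=
  -- L = [[0]*N, [0]*N, [0]*N]; for i in range(3): L[i][-1] = N-1 if impfs[S[N-1]] <= i+1 else N
  let row : List Int := List.replicate N.toNat 0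
  let r0 := PySem.List.pySetD row (-1) (if pyval S (N - 1) ≤ 1 then N - 1 else N)
  let r1 := PySem.List.pySetD row (-1) (if pyval S (N - 1) ≤ 2 then N - 1 else N)
  let r2 := PySem.List.pySetD row (-1) (if pyval S (N - 1) ≤ 3 then N - 1 else N)
  -- for k in range(N-2, -1, -1): …
  let t := (PySem.List.pyRange (N - 2) (-1) (-1)).foldl (mifStepA S) (r0, r1, r2)
  [t.1, t.2.1, t.2.2]

-- ===== PORT B =====
-- one row: pos = [k for k in range(N) if impfs[S[k]] <= i+1];
-- for p in pos: row.extend([p]*(p+1-len(row))); row.extend([N]*(N-len(row)))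
-- row.extend([p] * (p + 1 - len(row)))
def extendRow (row : List Int) (p : Int) : List Int :=
  row ++ List.replicate (p + 1 - (row.length : Int)).toNat p

-- row.extend([N] * (N - len(row)))
def finishRow (N : Int) (row : List Int) : List Int :=
  row ++ List.replicate (N - (row.length : Int)).toNat N

def mifRowB (S : String) (N : Int) (i : Int) : List Int :=
  let pos := (PySem.List.pyRange 0 N 1).filter (fun k => decide (pyval S k ≤ i + 1))
  finishRow N (pos.foldl extendRow [])

def minimal_impact_factors_alt (S : String) (P : List Int) (Q : List Int) (N : Int) : List (List Int) :=
  (PySem.List.pyRange 0 3 1).map (mifRowB S N)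

-- ===== PRECONDITION & SPEC =====
-- exactly where the Python A returns: S[N-1] exists and every inspected char is a key of impfs
def Pre_minimal_impact_factors (S : String) (P : List Int) (Q : List Int) (N : Int) : Prop :=
  1 ≤ N ∧ N ≤ PySem.Str.len S ∧
    ((S.toList.take N.toNat).all fun c => c == 'A' || c == 'C' || c == 'G' || c == 'T') = true
instance (S : String) (P : List Int) (Q : List Int) (N : Int) : Decidable (Pre_minimal_impact_factors S P Q N) := by unfold Pre_minimal_impact_factors; infer_instance

def pvWitness_minimal_impact_factors : String × List Int × List Int × Int := ("GACACGT", [0, 2], [3, 5], 7)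

def Spec_minimal_impact_factors (S : String) (P : List Int) (Q : List Int) (N : Int) (out : List (List Int)) : Prop := out = minimal_impact_factors_alt S P Q N
instance (S : String) (P : List Int) (Q : List Int) (N : Int) (out : List (List Int)) : Decidable (Spec_minimal_impact_factors S P Q N out) := by unfold Spec_minimal_impact_factors; infer_instance

-- ===== CLAIM (what is proved, stated in full; the proofs are below) =====
def Claim_equal_minimal_impact_factors : Prop := ∀ (S : String) (P : List Int) (Q : List Int) (N : Int), Dom_minimal_impact_factors S P Q N → Pre_minimal_impact_factors S P Q N → Spec_minimal_impact_factors S P Q N (minimal_impact_factors S P Q N)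
-- ===== LEMMAS AND PROOFS =====

-- the common semantics both programs compute: next index m ≥ k, m < n, with
-- impact factor ≤ i+1, else n
def nxtF (S : String) (i : Int) (n k : Nat) : Int :=
  if _h : k < n then (if pyval S (k : Int) ≤ i + 1 then (k : Int) else nxtF S i n (k + 1))
  else (n : Int)
termination_by n - k

lemma pyval_cases (S : String) (k : Int) :
    pyval S k = 1 ∨ pyval S k = 2 ∨ pyval S k = 3 ∨ pyval S k = 4 := by
  unfold pyval impfs PySem.Dict.getD
  rcases h : PySem.Dict.get? (PySem.Dict.mk [('A', 1), ('C', 2), ('G', 3), ('T', 4)])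
      ((PySem.Str.pyGet? S k).getD 'X') with _ | v
  · simp
  · simp only [Option.getD_some]
    simp only [PySem.Dict.get?_mk_cons] at h
    split_ifs at h <;> simp_all [PySem.Dict.get?]

-- body of a per-row backward pass (A's cascade decomposed row by row)
def mifStepR (S : String) (i : Int) (r : List Int) (k : Int) : List Int :=
  PySem.List.pySetD r k (if pyval S k ≤ i + 1 then k else PySem.List.pyGetD r (k + 1) 0)

lemma stepA_eq (S : String) (t : List Int × List Int × List Int) (k : Int) :
    mifStepA S t k = (mifStepR S 0 t.1 k, mifStepR S 1 t.2.1 k, mifStepR S 2 t.2.2 k) := by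
  rcases pyval_cases S k with h | h | h | h <;>
    simp [mifStepA, mifStepR, h]

lemma fold_eq (S : String) (ks : List Int) :
    ∀ t : List Int × List Int × List Int,
      ks.foldl (mifStepA S) t =
        (ks.foldl (mifStepR S 0) t.1, ks.foldl (mifStepR S 1) t.2.1, ks.foldl (mifStepR S 2) t.2.2) := by
  induction ks with
  | nil => intro t; rfl
  | cons k ks ih =>
    intro t
    simp only [List.foldl_cons, stepA_eq S t k]
    exact ih _

-- the state of a per-row backward pass after keys n-2 … c have been processed
def stateAt (S : String) (i : Int) (n c : Nat) : List Int :=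
  (List.range n).map (fun m => if c ≤ m then nxtF S i n m else 0)

lemma nxtF_of_cond (S : String) (i : Int) (n k : Nat) (hk : k < n)
    (hc : pyval S (k : Int) ≤ i + 1) : nxtF S i n k = (k : Int) := by
  rw [nxtF]; simp [hk, hc]

lemma nxtF_of_not_cond (S : String) (i : Int) (n k : Nat) (hk : k < n)
    (hc : ¬ pyval S (k : Int) ≤ i + 1) : nxtF S i n k = nxtF S i n (k + 1) := by
  rw [nxtF]; simp [hk, hc]

lemma nxtF_top (S : String) (i : Int) (n : Nat) : nxtF S i n n = (n : Int) := by
  rw [nxtF]; simp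

lemma nxtF_const_aux (S : String) (i : Int) (n : Nat) :
    ∀ j k, n - k = j → k ≤ n → (∀ m, k ≤ m → m < n → ¬ pyval S (m : Int) ≤ i + 1) →
      nxtF S i n k = (n : Int) := by
  intro j
  induction j with
  | zero =>
    intro k hj hk _
    have hkn : k = n := by omega
    subst hkn
    exact nxtF_top S i k
  | succ j ihj =>
    intro k hj hk hno
    rcases Nat.lt_or_ge k n with h | h
    · rw [nxtF_of_not_cond S i n k h (hno k le_rfl h)]
      exact ihj (k + 1) (by omega) (by omega) (fun m hm => hno m (by omega))
    · have hkn : k = n := by omega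
      subst hkn
      exact nxtF_top S i k

lemma nxtF_const (S : String) (i : Int) (n k : Nat) (hk : k ≤ n)
    (hno : ∀ m, k ≤ m → m < n → ¬ pyval S (m : Int) ≤ i + 1) :
    nxtF S i n k = (n : Int) :=
  nxtF_const_aux S i n (n - k) k rfl hk hno

lemma nxtF_run (S : String) (i : Int) (n p : Nat) (hp : p < n)
    (hcp : pyval S (p : Int) ≤ i + 1) :
    ∀ j k, p - k = j → k ≤ p → (∀ m, k ≤ m → m < p → ¬ pyval S (m : Int) ≤ i + 1) →
      nxtF S i n k = (p : Int) := by
  intro j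
  induction j with
  | zero =>
    intro k hj hk _
    have : k = p := by omega
    subst this
    exact nxtF_of_cond S i n k hp hcp
  | succ j ihj =>
    intro k hj hk hno
    have hkp : k < p := by omega
    rw [nxtF_of_not_cond S i n k (by omega) (hno k le_rfl hkp)]
    exact ihj (k + 1) (by omega) (by omega) (fun m hm => hno m (by omega))

lemma stepR_stateAt (S : String) (i : Int) (n c : Nat) (hc : c + 1 < n) :
    mifStepR S i (stateAt S i n (c + 1)) (c : Int) = stateAt S i n c := by
  unfold mifStepR
  have hget : PySem.List.pyGetD (stateAt S i n (c + 1)) ((c : Int) + 1) 0 = nxtF S i n (c + 1) := by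
    have : ((c : Int) + 1) = ((c + 1 : Nat) : Int) := by push_cast; ring
    rw [this, PySem.List.pyGetD_natCast]
    unfold stateAt
    rw [PySem.List.getD_map_range _ n (c + 1) 0 hc]
    simp
  rw [hget, PySem.List.pySetD_natCast]
  apply List.ext_getElem
  · simp [stateAt]
  · intro m hm hm'
    have hmn : m < n := by simpa [stateAt] using hm'
    by_cases h : m = c
    · subst h
      rw [List.getElem_set_self (by simpa [stateAt] using hm')]
      simp only [stateAt, List.getElem_map, List.getElem_range, le_refl, if_pos]
      by_cases hcnd : pyval S (m : Int) ≤ i + 1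
      · rw [nxtF_of_cond S i n m hmn hcnd]; simp [hcnd]
      · rw [nxtF_of_not_cond S i n m hmn hcnd]; simp [hcnd]
    · rw [List.getElem_set_ne (by omega)]
      simp only [stateAt, List.getElem_map, List.getElem_range]
      rcases Nat.lt_or_ge m c with h' | h'
      · rw [if_neg (by omega), if_neg (by omega)]
      · rw [if_pos (by omega), if_pos (by omega)]

-- the initial state (after the L[i][-1] assignment) is stateAt (n-1)
lemma init_stateAt (S : String) (i : Int) (N : Int) (hN : 1 ≤ N) :
    PySem.List.pySetD (List.replicate N.toNat 0) (-1)
        (if pyval S (N - 1) ≤ i + 1 then N - 1 else N) = stateAt S i N.toNat (N.toNat - 1) := by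
  set n := N.toNat with hn
  have hn1 : 1 ≤ n := by omega
  have hNn : (n : Int) = N := by omega
  have hset : PySem.List.pySetD (List.replicate n (0 : Int)) (-1) (if pyval S (N - 1) ≤ i + 1 then N - 1 else N)
      = (List.replicate n (0 : Int)).set (n - 1) (if pyval S (N - 1) ≤ i + 1 then N - 1 else N) := by
    unfold PySem.List.pySetD PySem.List.pySet? PySem.List.pyIdx?
    simp [show -(n : Int) ≤ -1 by omega]
  rw [hset]
  apply List.ext_getElem
  · simp [stateAt]
  · intro m hm hm'
    simp only [List.length_set, List.length_replicate] at hm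
    by_cases h : m = n - 1
    · subst h
      rw [List.getElem_set_self (by simpa using hm)]
      simp only [stateAt, List.getElem_map, List.getElem_range, le_refl, if_pos]
      have hmn : n - 1 < n := by omega
      have hcast : (((n - 1 : Nat)) : Int) = N - 1 := by omega
      by_cases hcnd : pyval S (N - 1) ≤ i + 1
      · rw [nxtF_of_cond S i n (n - 1) hmn (by rw [hcast]; exact hcnd)]
        simp [hcnd, hcast]
      · rw [nxtF_of_not_cond S i n (n - 1) hmn (by rw [hcast]; exact hcnd)]
        have : n - 1 + 1 = n := by omega
        rw [this, nxtF_top]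
        simp [hcnd, hNn]
    · rw [List.getElem_set_ne (by omega)]
      simp only [stateAt, List.getElem_map, List.getElem_range, List.getElem_replicate]
      have : ¬ (n - 1 ≤ m) := by omega
      simp [this]

-- A's per-row backward pass computes stateAt 0 = map nxtF
lemma rowA_eq (S : String) (i : Int) (N : Int) (hN : 1 ≤ N) :
    (PySem.List.pyRange (N - 2) (-1) (-1)).foldl (mifStepR S i)
        (PySem.List.pySetD (List.replicate N.toNat 0) (-1)
          (if pyval S (N - 1) ≤ i + 1 then N - 1 else N))
      = (List.range N.toNat).map (fun m => nxtF S i N.toNat m) := by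
  rw [init_stateAt S i N hN]
  set n := N.toNat with hn
  have key : ∀ c : Nat, c ≤ n - 1 →
      (PySem.List.pyRange ((c : Int) - 1) (-1) (-1)).foldl (mifStepR S i) (stateAt S i n c)
        = stateAt S i n 0 := by
    intro c
    induction c with
    | zero =>
      intro _
      rw [PySem.List.pyRange_neg_one_eq_nil (by omega)]
      rfl
    | succ c ih =>
      intro hc
      rw [PySem.List.pyRange_neg_one_cons (by omega)]
      simp only [List.foldl_cons]
      push_cast
      have e1 : ((c : Int) + 1 - 1) = (c : Int) := by ring
      rw [e1, stepR_stateAt S i n c (by omega)]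
      exact ih (by omega)
  have hNc : (N - 2 : Int) = ((n - 1 : Nat) : Int) - 1 := by omega
  rw [hNc, key (n - 1) le_rfl]
  unfold stateAt
  apply List.map_congr_left
  intro m hm
  simp

-- B's run-length construction also computes map nxtF
lemma rowB_fold (S : String) (i : Int) (N : Int) (hN : 1 ≤ N) :
    ∀ (l : List Nat) (a : Nat), a ≤ N.toNat →
      (∀ m, a ≤ m → m < N.toNat → (pyval S (m : Int) ≤ i + 1 ↔ m ∈ l)) →
      (∀ m ∈ l, a ≤ m) → (∀ m ∈ l, m < N.toNat) → l.Pairwise (· < ·) →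
      finishRow N ((l.map (fun p : Nat => (p : Int))).foldl extendRow
          ((List.range a).map (fun m => nxtF S i N.toNat m)))
        = (List.range N.toNat).map (fun m => nxtF S i N.toNat m) := by
  set n := N.toNat with hn
  have hNn : (n : Int) = N := by omega
  intro l
  induction l with
  | nil =>
    intro a ha hmem _ _ _
    simp only [List.map_nil, List.foldl_nil]
    unfold finishRow
    have hlen : ((List.range a).map (fun m => nxtF S i n m)).length = a := by simp
    rw [hlen]
    have hrep : (N - ((a : Nat) : Int)).toNat = n - a := by omega
    rw [hrep]
    have hrange : List.range n = List.range a ++ List.range' a (n - a) := by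
      rw [List.range_eq_range', show n = a + (n - a) by omega,
        ← List.range'_append (s := 0) (step := 1)]
      simp [List.range_eq_range']
    rw [hrange, List.map_append]
    congr 1
    have : ∀ x ∈ List.range' a (n - a), nxtF S i n x = N := by
      intro x hx
      rw [List.mem_range'] at hx
      rw [← hNn]
      exact nxtF_const S i n x (by omega)
        (fun m hm hm' hc => by simpa using (hmem m (by omega) hm').mp hc)
    refine (((List.map_congr_left this).trans ?_)).symm
    simp [List.map_const']
  | cons p l ihl =>
    intro a ha hmem hlb hub hsort
    obtain ⟨hpl, hsort'⟩ := List.pairwise_cons.mp hsort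
    have hap : a ≤ p := hlb p (by simp)
    have hpn : p < n := hub p (by simp)
    have hcp : pyval S (p : Int) ≤ i + 1 := (hmem p hap hpn).mpr (by simp)
    simp only [List.map_cons, List.foldl_cons]
    have hstep : extendRow ((List.range a).map (fun m => nxtF S i n m)) (p : Nat)
        = (List.range (p + 1)).map (fun m => nxtF S i n m) := by
      unfold extendRow
      have hlen : ((List.range a).map (fun m => nxtF S i n m)).length = a := by simp
      rw [hlen]
      have hcnt : (((p : Nat) : Int) + 1 - ((a : Nat) : Int)).toNat = p + 1 - a := by omega
      rw [hcnt]
      have hrange : List.range (p + 1) = List.range a ++ List.range' a (p + 1 - a) := by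
        rw [List.range_eq_range', show p + 1 = a + (p + 1 - a) by omega,
          ← List.range'_append (s := 0) (step := 1)]
        simp [List.range_eq_range']
      rw [hrange, List.map_append]
      congr 1
      have : ∀ x ∈ List.range' a (p + 1 - a), nxtF S i n x = (p : Int) := by
        intro x hx
        rw [List.mem_range'] at hx
        refine nxtF_run S i n p hpn hcp (p - x) x rfl (by omega) ?_
        intro m hm hm' hc
        rcases List.mem_cons.mp ((hmem m (by omega) (by omega)).mp hc) with h | h
        · omega
        · exact absurd (hpl m h) (by omega)
      refine (((List.map_congr_left this).trans ?_)).symm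
      simp [List.map_const']
    rw [hstep]
    refine ihl (p + 1) (by omega) ?_ (fun m hm => hpl m hm) (fun m hm => hub m (by simp [hm])) hsort'
    intro m hm hm'
    rw [hmem m (by omega) hm']
    simp only [List.mem_cons]
    constructor
    · rintro (h | h)
      · omega
      · exact h
    · intro h; exact Or.inr h

-- per-row: B's mifRowB equals map nxtF
lemma rowB_eq (S : String) (i : Int) (N : Int) (hN : 1 ≤ N) :
    mifRowB S N i = (List.range N.toNat).map (fun m => nxtF S i N.toNat m) := by
  unfold mifRowB
  set n := N.toNat with hn
  have hrange : PySem.List.pyRange 0 N 1 = (List.range n).map (fun k : Nat => (k : Int)) := by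
    simpa using PySem.List.pyRange_zero N
  rw [hrange, List.filter_map]
  have := rowB_fold S i N hN
    ((List.range n).filter (fun k : Nat => decide (pyval S (k : Int) ≤ i + 1))) 0
    (by omega)
    (by
      intro m hm hm'
      simp only [List.mem_filter, List.mem_range, decide_eq_true_eq]
      exact ⟨fun h => ⟨hm', h⟩, fun h => h.2⟩)
    (fun m _ => Nat.zero_le m)
    (fun m hm => List.mem_range.mp (List.mem_of_mem_filter hm))
    ((List.pairwise_lt_range).filter _)
  simpa using this

-- ===== VERDICT (by name: the statement is the Claim_ definition above) =====
theorem minimal_impact_factors_spec : Claim_equal_minimal_impact_factors := by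
  intro S P Q N _ hPre
  have hN : 1 ≤ N := hPre.1
  unfold Spec_minimal_impact_factors
  simp only [minimal_impact_factors, minimal_impact_factors_alt]
  rw [fold_eq]
  have r3 : PySem.List.pyRange 0 3 1 = [0, 1, 2] := by decide
  rw [r3]
  simp only [List.map_cons, List.map_nil]
  have h0 := rowA_eq S 0 N hN
  have h1 := rowA_eq S 1 N hN
  have h2 := rowA_eq S 2 N hN
  norm_num at h0 h1 h2
  rw [h0, h1, h2, rowB_eq S 0 N hN, rowB_eq S 1 N hN, rowB_eq S 2 N hN]
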